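-- pv_equiv track=rewrite | github.com/pgarrett-scripps/peptacular | src/peptacular/proforma/ambiguity.py | _construct_ambiguity_intervals
-- ===== SOURCE A (Python) =====
-- def _construct_ambiguity_intervals(
--     counts: list[int], reverse: bool
-- ) -> list[tuple[int, int]]:
--     """
--     Construct intervals for sequences of zeros in the counts list. When reverse is false, start from the left hand side
--     and move to the right. When reverse is true, start from the right hand side and move to the left. Intervals start
--     at 0 and end on any positive value. Both are inclusive. Returned intervals should be in forwards format, that is
--     have a starting value less than the ending value.
--
--     :param counts: List of integers (typically counts)
--     :param reverse: If True, reverse the list before processing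
--     :return: List of intervals [start, end] indicating runs of zeros
--
--     .. code-block:: python
--
--         # [0, 1, 1, 1, 0, 0, 0]
--         # [1, 1, 0, 0, 1, 1, 1] # ambiguity
--         >>> _construct_ambiguity_intervals([0, 1, 1, 1, 0, 0, 0], reverse=False)
--         [(0, 1), (4, 6)]
--
--         # [0, 0, 1, 1, 1, 1, 0]
--         # [1, 1, 0, 0, 0, 1, 1] # ambiguity
--         >>> _construct_ambiguity_intervals([0, 0, 1, 1, 1, 0, 0], reverse=True)
--         [(0, 1), (4, 6)]
--
--         >>> _construct_ambiguity_intervals([0, 1, 1, 1, 0, 0, 1], reverse=False)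
--         [(0, 1), (4, 6)]
--     """
--
--     if reverse:
--         ambiguity_intervals = _construct_ambiguity_intervals(
--             counts[::-1], reverse=False
--         )
--         ambiguity_intervals = [
--             (len(counts) - 1 - end, len(counts) - 1 - start)
--             for start, end in ambiguity_intervals
--         ]
--         # sort the intervals
--         ambiguity_intervals.sort(key=lambda x: x[0])
--         return ambiguity_intervals
--
--     ambiguity_intervals: list[tuple[int, int]] = []
--     current_interval = None
--     for i, cnt in enumerate(counts):
--         if cnt == 0:
--             if current_interval is not None:
--                 current_interval = (current_interval[0], i)
--             else:
--                 current_interval = (i, i)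
--
--         else:
--             if current_interval is not None:
--                 current_interval = (current_interval[0], i)
--                 ambiguity_intervals.append(current_interval)
--                 current_interval = None
--             else:
--                 continue
--
--     if current_interval is not None:
--         current_interval = (current_interval[0], len(counts) - 1)
--         ambiguity_intervals.append(current_interval)
--
--     return ambiguity_intervals
-- ===== SOURCE B (Python) =====
-- def _construct_ambiguity_intervals(
--     counts: list[int], reverse: bool
-- ) -> list[tuple[int, int]]:
--     n = len(counts)
--     # Scan right-to-left, collecting maximal zero-runs (lo, hi); runs come out
--     # in descending start order, so one final reverse yields ascending order.
--     runs = []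
--     for i in range(n - 1, -1, -1):
--         if counts[i] == 0:
--             if runs and runs[-1][0] == i + 1:
--                 runs[-1] = (i, runs[-1][1])
--             else:
--                 runs.append((i, i))
--     runs.reverse()
--     # Each run maps directly to its interval: the closing bound attaches to the
--     # adjacent positive value (next for forward, previous for reverse), clamped.
--     if reverse:
--         return [(max(lo - 1, 0), hi) for lo, hi in runs]
--     return [(lo, min(hi + 1, n - 1)) for lo, hi in runs]
-- ===== Notes on version B (the rewrite author's own statement) =====
-- stated objective: simpler
-- what changed: A's forward state machine plus (for reverse) a recursive call on the reversed list, index mirroring and a sort are replaced by one right-to-left scan that collects maximal zero-runs and a direct clamped map (lo, min(hi+1, n-1)) / (max(lo-1, 0), hi); no recursion, no list reversal of the input, no sort.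
import Mathlib
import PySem

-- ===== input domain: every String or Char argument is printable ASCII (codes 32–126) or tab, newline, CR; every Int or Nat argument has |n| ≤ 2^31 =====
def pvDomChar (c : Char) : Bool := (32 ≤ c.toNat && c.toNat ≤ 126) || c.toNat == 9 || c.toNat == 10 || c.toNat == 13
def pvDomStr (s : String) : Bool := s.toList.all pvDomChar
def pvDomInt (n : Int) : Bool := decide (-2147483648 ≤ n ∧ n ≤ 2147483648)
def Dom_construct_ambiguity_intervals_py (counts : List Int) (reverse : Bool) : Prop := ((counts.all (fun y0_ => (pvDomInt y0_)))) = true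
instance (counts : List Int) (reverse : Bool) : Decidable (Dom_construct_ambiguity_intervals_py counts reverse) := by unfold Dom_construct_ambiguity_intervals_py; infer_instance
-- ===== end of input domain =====

-- B replaces A's forward state machine plus (for reverse) recursion on the reversed
-- list, index mirroring and a sort by one right-to-left zero-run collection and a
-- direct clamped map per run (objective: simpler).

-- ===== PORT A =====
-- loop body of A's forward scan; state = (ambiguity_intervals, current_interval)
def pvAStep (st : List (Int × Int) × Option (Int × Int)) (p : Int × Int) :
    List (Int × Int) × Option (Int × Int) :=
  if p.2 = 0 then
    match st.2 with
    | some cur => (st.1, some (cur.1, p.1))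
    | none     => (st.1, some (p.1, p.1))
  else
    match st.2 with
    | some cur => (st.1 ++ [(cur.1, p.1)], none)
    | none     => st

-- the trailing 'if current_interval is not None: …' of A
def pvAFinish (last : Int) (st : List (Int × Int) × Option (Int × Int)) : List (Int × Int) :=
  match st.2 with
  | some cur => st.1 ++ [(cur.1, last)]
  | none     => st.1

def pvAForward (counts : List Int) : List (Int × Int) :=
  pvAFinish ((counts.length : Int) - 1)
    ((PySem.List.enumerate counts 0).foldl pvAStep ([], none))

def construct_ambiguity_intervals_py (counts : List Int) (reverse : Bool) : List (Int × Int) :=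
  if reverse then
    -- counts[::-1]; slice? is none only for step 0, so getD never sees its default
    let rev := (PySem.List.slice? counts none none (-1)).getD []
    let mapped := (pvAForward rev).map
      (fun se => ((counts.length : Int) - 1 - se.2, (counts.length : Int) - 1 - se.1))
    PySem.List.sorted mapped (fun x => x.1) false
  else
    pvAForward counts

-- ===== PORT B =====
-- Source B's loop body: extend the most recent zero-run leftwards or start a new one
def pvMerge (i : Int) : List (Int × Int) → List (Int × Int)
  | (lo, hi) :: rest => if lo = i + 1 then (i, hi) :: rest else (i, i) :: (lo, hi) :: rest
  | [] => [(i, i)]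

def pvBStep (counts : List Int) (runs : List (Int × Int)) (i : Int) : List (Int × Int) :=
  match PySem.List.pyGet? counts i with
  | some c => if c = 0 then pvMerge i runs else runs
  | none   => runs   -- unreachable: i ranges over valid indices of counts

def construct_ambiguity_intervals_py_alt (counts : List Int) (reverse : Bool) : List (Int × Int) :=
  -- the Lean run list is built head-first (head = python's runs[-1]), so after the
  -- right-to-left loop it already stands in the order python's final runs.reverse() yields
  let n : Int := counts.length
  let runs := (PySem.List.pyRange (n - 1) (-1) (-1)).foldl (pvBStep counts) []
  if reverse then runs.map (fun r => (max (r.1 - 1) 0, r.2))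
  else runs.map (fun r => (r.1, min (r.2 + 1) (n - 1)))

-- ===== PRECONDITION & SPEC =====
def Spec_construct_ambiguity_intervals_py (counts : List Int) (reverse : Bool) (out : List (Int × Int)) : Prop := out = construct_ambiguity_intervals_py_alt counts reverse
instance (counts : List Int) (reverse : Bool) (out : List (Int × Int)) : Decidable (Spec_construct_ambiguity_intervals_py counts reverse out) := by unfold Spec_construct_ambiguity_intervals_py; infer_instance

-- ===== CLAIM (what is proved, stated in full; the proofs are below) =====
def Claim_equal_construct_ambiguity_intervals_py : Prop := ∀ (counts : List Int) (reverse : Bool), Dom_construct_ambiguity_intervals_py counts reverse → Spec_construct_ambiguity_intervals_py counts reverse (construct_ambiguity_intervals_py counts reverse)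

-- ===== LEMMAS AND PROOFS =====

-- the maximal zero-runs of xs, indexed from i (merge-cons characterisation)
def pvRuns : List Int → Int → List (Int × Int)
  | [], _ => []
  | x :: xs, i => if x = 0 then pvMerge i (pvRuns xs (i + 1)) else pvRuns xs (i + 1)

def pvG (last : Int) (r : Int × Int) : Int × Int := (r.1, min (r.2 + 1) last)
def pvH (r : Int × Int) : Int × Int := (max (r.1 - 1) 0, r.2)
def pvRefl (S : Int) (r : Int × Int) : Int × Int := (S - r.2, S - r.1)

-- an open run started at lo, with positions < i already consumed
def pvOpen (lo i : Int) : List (Int × Int) → List (Int × Int)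
  | (lo', hi) :: rest => if lo' = i then (lo, hi) :: rest else (lo, i - 1) :: (lo', hi) :: rest
  | [] => [(lo, i - 1)]

lemma pvMerge_eq_open (i : Int) (rs : List (Int × Int)) : pvMerge i rs = pvOpen i (i + 1) rs := by
  cases rs with
  | nil => simp [pvMerge, pvOpen]
  | cons r rest => cases r; simp [pvMerge, pvOpen]

lemma pvOpen_open (lo i : Int) (rs : List (Int × Int)) :
    pvOpen lo i (pvOpen i (i + 1) rs) = pvOpen lo (i + 1) rs := by
  cases rs with
  | nil => simp [pvOpen]
  | cons r rest =>
    cases r with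
    | mk lo' hi =>
      by_cases h : lo' = i + 1 <;> simp [pvOpen, h]

-- run-list invariant: starts ≥ i, runs ordered with gaps ≥ 2
def pvGaps : Int → List (Int × Int) → Prop
  | _, [] => True
  | i, (lo, hi) :: rs => i ≤ lo ∧ lo ≤ hi ∧ pvGaps (hi + 2) rs

lemma pvGaps_mono {i j : Int} {rs : List (Int × Int)} (h : j ≤ i) (hg : pvGaps i rs) : pvGaps j rs := by
  cases rs with
  | nil => trivial
  | cons r rest =>
    cases r with
    | mk lo hi => exact ⟨le_trans h hg.1, hg.2.1, hg.2.2⟩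

lemma pvRuns_gaps (xs : List Int) : ∀ i : Int, pvGaps i (pvRuns xs i) := by
  induction xs with
  | nil => intro i; trivial
  | cons x xs ih =>
    intro i
    by_cases hx : x = 0
    · simp only [pvRuns, hx, if_true]
      have h := ih (i + 1)
      cases hr : pvRuns xs (i + 1) with
      | nil => exact ⟨le_refl i, le_refl i, trivial⟩
      | cons r rest =>
        cases r with
        | mk lo hi =>
          rw [hr] at h
          obtain ⟨ha, hb, hc⟩ := h
          by_cases hl : lo = i + 1
          · simp only [pvMerge, hl, if_true]
            exact ⟨le_refl i, by omega, hc⟩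
          · simp only [pvMerge, hl, if_false]
            exact ⟨le_refl i, le_refl i, ⟨by omega, hb, hc⟩⟩
    · simp only [pvRuns, hx, if_false]
      exact pvGaps_mono (by omega) (ih (i + 1))

lemma pvGaps_lb {i : Int} {rs : List (Int × Int)} (h : pvGaps i rs) :
    ∀ r ∈ rs, i ≤ r.1 := by
  induction rs generalizing i with
  | nil => intro r hr; cases hr
  | cons a rest ih =>
    cases a with
    | mk lo hi =>
      intro r hr
      rcases List.mem_cons.mp hr with h1 | h1
      · subst h1; exact h.1
      · have := ih h.2.2 r h1
        have h1 := h.1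
        have h2 := h.2.1
        omega

lemma pvGaps_pairwise {rs : List (Int × Int)} : ∀ i : Int, 0 ≤ i → pvGaps i rs →
    (rs.map pvH).Pairwise (fun a b => a.1 < b.1) := by
  induction rs with
  | nil => intro i _ _; simp
  | cons a rest ih =>
    cases a with
    | mk lo hi =>
      intro i h0 hg
      rw [List.map_cons, List.pairwise_cons]
      constructor
      · intro b hb
        rcases List.mem_map.mp hb with ⟨r, hr, hrb⟩
        have hlb := pvGaps_lb hg.2.2 r hr
        have h1 := hg.1
        have h2 := hg.2.1
        subst hrb
        simp only [pvH]
        omega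
      · exact ih (hi + 2) (by have := hg.1; have := hg.2.1; omega) hg.2.2

-- A's forward loop computes the clamped map of the runs
lemma pvA_loop (xs : List Int) : ∀ (i last : Int) (acc : List (Int × Int)),
    i + xs.length = last + 1 →
    (pvAFinish last ((PySem.List.enumerate xs i).foldl pvAStep (acc, none))
       = acc ++ (pvRuns xs i).map (pvG last))
    ∧ ∀ (lo j : Int),
      pvAFinish last ((PySem.List.enumerate xs i).foldl pvAStep (acc, some (lo, j)))
        = acc ++ (pvOpen lo i (pvRuns xs i)).map (pvG last) := by
  induction xs with
  | nil =>
    intro i last acc h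
    constructor
    · simp [PySem.List.enumerate_nil, pvAFinish, pvRuns]
    · intro lo j
      simp only [List.length_nil, Nat.cast_zero, add_zero] at h
      simp only [PySem.List.enumerate_nil, List.foldl_nil, pvAFinish, pvRuns, pvOpen,
        List.map_cons, List.map_nil, pvG]
      have : min (i - 1 + 1) last = last := by omega
      rw [this]
  | cons x xs ih =>
    intro i last acc h
    simp only [List.length_cons] at h
    have h' : (i + 1) + (xs.length : Int) = last + 1 := by push_cast at h ⊢; omega
    have hle : i ≤ last := by push_cast at h; omega
    constructor
    · by_cases hx : x = 0
      · simp only [PySem.List.enumerate_cons, List.foldl_cons, pvAStep, hx, if_true]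
        have := ((ih (i + 1) last acc h').2) i i
        simpa [pvRuns, hx, pvMerge_eq_open] using this
      · simp only [PySem.List.enumerate_cons, List.foldl_cons, pvAStep, hx, if_false]
        have := (ih (i + 1) last acc h').1
        simpa [pvRuns, hx] using this
    · intro lo j
      by_cases hx : x = 0
      · simp only [PySem.List.enumerate_cons, List.foldl_cons, pvAStep, hx, if_true]
        have := ((ih (i + 1) last acc h').2) lo i
        rw [this]
        simp only [pvRuns, if_true, pvMerge_eq_open, pvOpen_open]
      · simp only [PySem.List.enumerate_cons, List.foldl_cons, pvAStep, hx, if_false]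
        have := (ih (i + 1) last (acc ++ [(lo, i)]) h').1
        rw [this]
        simp only [pvRuns, hx, if_false]
        have hg := pvRuns_gaps xs (i + 1)
        cases hr : pvRuns xs (i + 1) with
        | nil =>
          simp only [pvOpen, List.map_cons, List.map_nil, pvG, List.append_assoc]
          simp
          omega
        | cons r rest =>
          cases r with
          | mk lo' hi =>
            rw [hr] at hg
            have hlo' : i + 1 ≤ lo' := hg.1
            have hne : ¬ (lo' = i) := by omega
            simp only [pvOpen, hne, if_false, List.map_cons, pvG, List.append_assoc]
            simp
            omega

lemma pvAForward_eq (counts : List Int) :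
    pvAForward counts = (pvRuns counts 0).map (pvG ((counts.length : Int) - 1)) := by
  have := (pvA_loop counts 0 ((counts.length : Int) - 1) [] (by omega)).1
  simpa [pvAForward] using this

-- B's fold over the countdown range computes pvRuns
lemma pvB_foldr (suf : List Int) : ∀ (pre : List Int),
    (PySem.List.pyRange (pre.length : Int) ((pre.length : Int) + (suf.length : Int)) 1).foldr
      (fun i acc => pvBStep (pre ++ suf) acc i) []
    = pvRuns suf (pre.length : Int) := by
  induction suf with
  | nil =>
    intro pre
    simp [PySem.List.pyRange_one_eq_nil, pvRuns]
  | cons c suf ih =>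
    intro pre
    rw [PySem.List.pyRange_one_cons (by simp only [List.length_cons]; push_cast; omega)]
    rw [List.foldr_cons]
    have h2 := ih (pre ++ [c])
    have hcast : (((pre ++ [c]).length : Nat) : Int) = (pre.length : Int) + 1 := by
      simp
    rw [hcast] at h2
    have happ : (pre ++ [c]) ++ suf = pre ++ c :: suf := by simp
    rw [happ] at h2
    have hlen : (pre.length : Int) + ((c :: suf).length : Int)
        = ((pre.length : Int) + 1) + (suf.length : Int) := by
      simp only [List.length_cons]; push_cast; ring
    rw [hlen, h2]
    have hget : PySem.List.pyGet? (pre ++ c :: suf) (pre.length : Int) = some c := by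
      rw [PySem.List.pyGet?_natCast]
      rw [List.getElem?_append_right (le_refl _)]
      simp
    simp only [pvBStep, hget, pvRuns]

lemma pvB_runs (counts : List Int) :
    (PySem.List.pyRange ((counts.length : Int) - 1) (-1) (-1)).foldl (pvBStep counts) []
      = pvRuns counts 0 := by
  have h : PySem.List.pyRange ((counts.length : Int) - 1) (-1) (-1)
      = (PySem.List.pyRange 0 (counts.length : Int) 1).reverse := by
    rw [PySem.List.pyRange_neg_one_eq_reverse]
    norm_num
  rw [h, List.foldl_reverse]
  have := pvB_foldr counts []
  simpa using this

-- shifting the start index shifts every run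
lemma pvMerge_map_shift (d i : Int) (rs : List (Int × Int)) :
    (pvMerge i rs).map (fun r => (r.1 + d, r.2 + d)) =
      pvMerge (i + d) (rs.map (fun r => (r.1 + d, r.2 + d))) := by
  cases rs with
  | nil => simp [pvMerge]
  | cons r rest =>
    cases r with
    | mk lo hi =>
      by_cases hl : lo = i + 1
      · subst hl; simp [pvMerge]; ring
      · have h2 : ¬ (lo + d = i + d + 1) := by omega
        simp [pvMerge, hl, h2]

lemma pvRuns_shift (xs : List Int) : ∀ i : Int,
    pvRuns xs i = (pvRuns xs 0).map (fun r => (r.1 + i, r.2 + i)) := by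
  induction xs with
  | nil => intro i; simp [pvRuns]
  | cons x xs ih =>
    intro i
    by_cases hx : x = 0
    · simp only [pvRuns, hx, if_true]
      rw [ih (i + 1), ih (0 + 1), pvMerge_map_shift i 0, zero_add]
      congr 1
      rw [List.map_map]
      congr 1
      funext r
      simp
      constructor <;> ring
    · simp only [pvRuns, hx, if_false]
      rw [ih (i + 1), ih (0 + 1), List.map_map]
      congr 1
      funext r
      simp
      constructor <;> ring

-- appending a nonzero element does not change the runs
lemma pvRuns_snoc_nz (c : Int) (hc : ¬ (c = 0)) (ys : List Int) : ∀ i : Int,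
    pvRuns (ys ++ [c]) i = pvRuns ys i := by
  induction ys with
  | nil => intro i; simp [pvRuns, hc]
  | cons y ys ih =>
    intro i
    by_cases hy : y = 0 <;> simp [pvRuns, hy, ih (i + 1)]

-- appending a zero at position m: extend the final run to m or add a run [m,m]
def pvSnocZ (m : Int) : List (Int × Int) → List (Int × Int)
  | [] => [(m, m)]
  | [r] => if r.2 = m - 1 then [(r.1, m)] else [r, (m, m)]
  | r :: s :: rest => r :: pvSnocZ m (s :: rest)

lemma pvMerge_snocZ (i m : Int) (_him : i + 1 ≤ m) (rs : List (Int × Int)) :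
    pvMerge i (pvSnocZ m rs) = pvSnocZ m (pvMerge i rs) := by
  cases rs with
  | nil =>
    by_cases hm : m = i + 1
    · simp [pvSnocZ, pvMerge, hm]
    · have h2 : ¬ ((i : Int) = m - 1) := by omega
      simp [pvSnocZ, pvMerge, hm, h2]
  | cons r rest =>
    cases r with
    | mk lo hi =>
      cases rest with
      | nil =>
        by_cases hh : hi = m - 1
        · by_cases hl : lo = i + 1 <;> simp [pvSnocZ, pvMerge, hh, hl]
        · by_cases hl : lo = i + 1 <;> simp [pvSnocZ, pvMerge, hh, hl]
      | cons s rest' =>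
        by_cases hl : lo = i + 1 <;> simp [pvSnocZ, pvMerge, hl]

lemma pvRuns_snoc_z (ys : List Int) : ∀ i : Int,
    pvRuns (ys ++ [0]) i = pvSnocZ (i + (ys.length : Int)) (pvRuns ys i) := by
  induction ys with
  | nil =>
    intro i
    simp only [List.length_nil, Nat.cast_zero, add_zero, List.nil_append]
    rfl
  | cons y ys ih =>
    intro i
    have hlen : i + (((y :: ys).length : Nat) : Int) = (i + 1) + (ys.length : Int) := by
      simp only [List.length_cons]; push_cast; ring
    rw [hlen]
    by_cases hy : y = 0
    · simp only [List.cons_append, pvRuns, hy, if_true]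
      rw [ih (i + 1)]
      exact pvMerge_snocZ i ((i + 1) + (ys.length : Int)) (by omega) _
    · simp only [List.cons_append, pvRuns, hy, if_false]
      exact ih (i + 1)

lemma pvSnocZ_append_last (m : Int) (r : Int × Int) : ∀ A : List (Int × Int),
    pvSnocZ m (A ++ [r]) = A ++ (if r.2 = m - 1 then [(r.1, m)] else [r, (m, m)]) := by
  intro A
  induction A with
  | nil => simp [pvSnocZ]
  | cons a A ih =>
    have h2 : pvSnocZ m (a :: (A ++ [r])) = a :: pvSnocZ m (A ++ [r]) := by
      rcases hA : A ++ [r] with _ | ⟨s, rest⟩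
      · exact absurd hA (by simp)
      · rfl
    rw [List.cons_append, h2, ih, List.cons_append]

-- the runs of the reversed list are the reflected runs, in reverse order
lemma pvRuns_reverse (xs : List Int) :
    pvRuns xs.reverse 0 = (((pvRuns xs 0).map (pvRefl ((xs.length : Int) - 1)))).reverse := by
  induction xs with
  | nil => simp [pvRuns]
  | cons x xs ih =>
    have hshift : pvRuns xs (0 + 1) = (pvRuns xs 0).map (fun r => (r.1 + 1, r.2 + 1)) := by
      rw [pvRuns_shift xs (0 + 1)]; norm_num
    have hm : (((x :: xs).length : Nat) : Int) - 1 = (xs.length : Int) := by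
      simp only [List.length_cons]; push_cast; ring
    by_cases hx : x = 0
    · subst hx
      have hruns : pvRuns (0 :: xs) 0 = pvMerge 0 (pvRuns xs (0 + 1)) := by
        simp [pvRuns]
      rw [List.reverse_cons, pvRuns_snoc_z, ih, hruns, hshift, hm]
      simp only [List.length_reverse, zero_add]
      have hT : (pvRefl ((xs.length : Nat) : Int)) ∘ (fun r : Int × Int => (r.1 + 1, r.2 + 1))
          = pvRefl (((xs.length : Nat) : Int) - 1) := by
        funext r
        cases r with
        | mk a b =>
          simp only [Function.comp_apply, pvRefl, Prod.mk.injEq]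
          constructor <;> ring
      cases hZ : pvRuns xs 0 with
      | nil => simp [pvSnocZ, pvMerge, pvRefl]
      | cons r rest =>
        cases r with
        | mk lo hi =>
          rw [List.map_cons, List.reverse_cons, pvSnocZ_append_last, List.map_cons]
          by_cases hlo : lo = 0
          · subst hlo
            rw [if_pos (by simp only [pvRefl]; omega)]
            rw [show pvMerge 0 ((0 + 1, hi + 1) :: List.map (fun r : Int × Int => (r.1 + 1, r.2 + 1)) rest)
                = (0, hi + 1) :: List.map (fun r : Int × Int => (r.1 + 1, r.2 + 1)) rest from by
              simp [pvMerge]]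
            rw [List.map_cons, List.reverse_cons, List.map_map, hT]
            congr 1
            simp only [pvRefl, Prod.mk.injEq, List.cons.injEq, and_true]
            omega
          · rw [if_neg (by simp only [pvRefl]; omega)]
            rw [show pvMerge 0 ((lo + 1, hi + 1) :: List.map (fun r : Int × Int => (r.1 + 1, r.2 + 1)) rest)
                = (0, 0) :: (lo + 1, hi + 1) :: List.map (fun r : Int × Int => (r.1 + 1, r.2 + 1)) rest from by
              simp [pvMerge, hlo]]
            rw [List.map_cons, List.map_cons, List.reverse_cons, List.reverse_cons, List.map_map, hT,
              List.append_assoc]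
            congr 1
            simp only [pvRefl, List.singleton_append, List.cons.injEq, Prod.mk.injEq, and_true]
            omega
    · rw [List.reverse_cons, pvRuns_snoc_nz x hx, ih]
      simp only [pvRuns, hx, if_false, hm, hshift, List.map_map]
      congr 1
      congr 1
      funext r
      simp [pvRefl]
      constructor <;> ring

-- the composite mirror ∘ clamp ∘ mirror is B's reverse-side clamp
lemma pvRefl_g_refl (S : Int) (r : Int × Int) :
    (fun se : Int × Int => (S - se.2, S - se.1)) (pvG S (pvRefl S r)) = pvH r := by
  cases r with
  | mk lo hi =>
    simp only [pvRefl, pvG, pvH, Prod.mk.injEq]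
    constructor <;> omega

lemma pvMapped (S : Int) (Z : List (Int × Int)) :
    ((((Z.map (pvRefl S)).reverse).map (pvG S)).map
        (fun se : Int × Int => (S - se.2, S - se.1)))
      = (Z.map pvH).reverse := by
  rw [List.map_reverse, List.map_reverse, List.map_map, List.map_map]
  congr 1
  apply List.map_congr_left
  intro r _
  simp only [Function.comp_apply]
  exact pvRefl_g_refl S r

-- ===== VERDICT (by name: the statement is the Claim_ definition above) =====
theorem construct_ambiguity_intervals_py_spec : Claim_equal_construct_ambiguity_intervals_py := by
  intro counts reverse _
  unfold Spec_construct_ambiguity_intervals_py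
  unfold construct_ambiguity_intervals_py construct_ambiguity_intervals_py_alt
  cases reverse with
  | false =>
    simp only [if_false, Bool.false_eq_true]
    rw [pvB_runs, pvAForward_eq]
    rfl
  | true =>
    simp only [if_true]
    rw [pvB_runs]
    rw [PySem.List.slice?_none_none_neg_one]
    simp only [Option.getD_some]
    rw [pvAForward_eq]
    simp only [List.length_reverse]
    rw [pvRuns_reverse, pvMapped]
    have hpair : ((pvRuns counts 0).map pvH).Pairwise (fun a b => a.1 < b.1) :=
      pvGaps_pairwise 0 (le_refl 0) (pvRuns_gaps counts 0)
    rw [PySem.List.sorted_eq_of_perm_of_pairwise_lt _ _ _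
      (((pvRuns counts 0).map pvH).reverse_perm.symm) hpair]
    rfl
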